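-- pv_equiv track=rewrite | github.com/OscarHoekstra/ClassifyNPDB | Scripts/Run_pyclassyfire4.py | CopyDirectParent
-- ===== SOURCE A (Python) =====
-- def CopyDirectParent(EX):
--     """Copies the direct parent to the place it should be in the
--     classificatoin hierarchy in the list EX, which will be used to
--     fill the SQL database"""
--     pos = 0
--     for item in EX:
--         if pos>0 and item == EX[0]:
--             return EX
--         if item == "NA":
--             EX[pos] = EX[0]
--             return EX
--         pos += 1
--     return EX
-- ===== SOURCE B (Python) =====
-- def CopyDirectParent(EX):
--     dup = next((i for i in range(1, len(EX)) if EX[i] == EX[0]), None)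
--     na = next((i for i in range(len(EX)) if EX[i] == "NA"), None)
--     if na is not None and (dup is None or na < dup):
--         EX[na] = EX[0]
--     return EX
-- ===== Notes on version B (the rewrite author's own statement) =====
-- stated objective: simpler
-- what changed: Replaces A's single merged loop with early returns by two independent index searches (first duplicate of EX[0] after position 0, first 'NA') and a single min-position decision on whether to write.
import Mathlib
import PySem

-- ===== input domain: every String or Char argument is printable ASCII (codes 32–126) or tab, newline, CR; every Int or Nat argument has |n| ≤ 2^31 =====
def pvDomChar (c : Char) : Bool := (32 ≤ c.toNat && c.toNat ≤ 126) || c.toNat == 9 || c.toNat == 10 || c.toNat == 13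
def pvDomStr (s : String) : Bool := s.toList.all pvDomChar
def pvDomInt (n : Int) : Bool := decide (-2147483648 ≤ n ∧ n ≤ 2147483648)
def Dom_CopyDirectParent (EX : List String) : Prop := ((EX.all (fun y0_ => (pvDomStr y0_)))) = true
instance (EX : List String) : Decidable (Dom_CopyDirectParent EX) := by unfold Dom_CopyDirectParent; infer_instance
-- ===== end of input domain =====

-- B replaces A's single merged early-return loop by two separate index searches and one
-- min-position decision (objective: simpler). A mutates EX in place; B performs the same
-- single in-place write, and the equivalence proved here is about the return value.

-- ===== PORT A =====
-- the loop of A: iterate over the remaining items `rest` with counter `pos`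
def copyDPLoop (EX : List String) (rest : List String) (pos : Nat) : List String :=
  match rest with
  | [] => EX
  | item :: rs =>
    if pos > 0 ∧ item = EX.headD "" then EX
    else if item = "NA" then EX.set pos (EX.headD "")
    else copyDPLoop EX rs (pos + 1)

def CopyDirectParent (EX : List String) : List String :=
  copyDPLoop EX EX 0

-- ===== PORT B =====
-- dup = first index i ≥ 1 with EX[i] == EX[0] (next(... range(1, len EX) ...) in Source B)
-- na  = first index i with EX[i] == "NA"
def CopyDirectParent_alt (EX : List String) : List String :=
  let dup : Option Nat :=
    match EX with
    | [] => none
    | h :: t => (t.findIdx? (· == h)).map (· + 1)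
  let na : Option Nat := EX.findIdx? (· == "NA")
  match na with
  | none => EX
  | some n =>
    match dup with
    | none => EX.set n (EX.headD "")
    | some d => if n < d then EX.set n (EX.headD "") else EX

-- ===== PRECONDITION & SPEC =====
def Spec_CopyDirectParent (EX : List String) (out : List String) : Prop := out = CopyDirectParent_alt EX
instance (EX : List String) (out : List String) : Decidable (Spec_CopyDirectParent EX out) := by unfold Spec_CopyDirectParent; infer_instance

-- ===== CLAIM (what is proved, stated in full; the proofs are below) =====
def Claim_equal_CopyDirectParent : Prop := ∀ (EX : List String), Dom_CopyDirectParent EX → Spec_CopyDirectParent EX (CopyDirectParent EX)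

-- ===== LEMMAS AND PROOFS =====

-- characterisation of A's loop on a suffix, for positions > 0, when the head is not "NA"
theorem copyDPLoop_char (EX : List String) (hNA : EX.headD "" ≠ "NA") :
    ∀ (t : List String) (pos : Nat), 0 < pos →
    copyDPLoop EX t pos =
      match t.findIdx? (· == EX.headD ""), t.findIdx? (· == "NA") with
      | none, none => EX
      | some _, none => EX
      | none, some n => EX.set (pos + n) (EX.headD "")
      | some d, some n => if n < d then EX.set (pos + n) (EX.headD "") else EX := by
  intro t
  induction t with
  | nil => intro pos _; simp only [copyDPLoop, List.findIdx?_nil]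
  | cons item rs ih =>
    intro pos hpos
    simp only [copyDPLoop, List.findIdx?_cons, beq_iff_eq]
    set h0 := EX.headD "" with hh0
    by_cases hdup : item = h0
    · have hitemNA : ¬ item = "NA" := by rw [hdup]; exact hNA
      rw [if_pos ⟨hpos, hdup⟩, if_pos hdup, if_neg hitemNA]
      cases h : rs.findIdx? (· == "NA") with
      | none => rfl
      | some n => simp only [Option.map_some]
                  rw [if_neg (Nat.not_lt_zero _)]
    · by_cases hna : item = "NA"
      · rw [if_neg (by tauto), if_pos hna, if_neg hdup, if_pos hna]
        cases hd : rs.findIdx? (· == h0) with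
        | none => simp only [Option.map_none]; rfl
        | some d => simp only [Option.map_some]
                    rw [if_pos (Nat.succ_pos d)]; rfl
      · rw [if_neg (by tauto), if_neg hna, if_neg hdup, if_neg hna,
            ih (pos + 1) (Nat.succ_pos pos)]
        cases hd : rs.findIdx? (· == h0) with
        | none =>
          cases hn : rs.findIdx? (· == "NA") with
          | none => rfl
          | some n => simp only [Option.map_none, Option.map_some]
                      rw [Nat.add_assoc, Nat.add_comm 1 n]
        | some d =>
          cases hn : rs.findIdx? (· == "NA") with
          | none => rfl
          | some n =>
            simp only [Option.map_some]
            by_cases hlt : n < d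
            · rw [if_pos hlt, if_pos (Nat.succ_lt_succ hlt),
                  Nat.add_assoc, Nat.add_comm 1 n]
            · rw [if_neg hlt, if_neg (fun hc => hlt (Nat.lt_of_succ_lt_succ hc))]

-- ===== VERDICT (by name: the statement is the Claim_ definition above) =====
theorem CopyDirectParent_spec : Claim_equal_CopyDirectParent := by
  intro EX _
  unfold Spec_CopyDirectParent CopyDirectParent CopyDirectParent_alt
  cases EX with
  | nil => rfl
  | cons h t =>
    simp only [List.findIdx?_cons, beq_iff_eq, List.headD_cons]
    by_cases hNA : h = "NA"
    · subst hNA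
      simp only [copyDPLoop, Nat.lt_irrefl, false_and, if_false, ite_true, List.headD_cons,
                 List.set_cons_zero]
      cases hd : t.findIdx? (· == "NA") with
      | none => rfl
      | some d => simp only [Option.map_some]
                  rw [if_pos (Nat.succ_pos d)]
    · have hloop := copyDPLoop_char (h :: t) (by simpa using hNA) t 1 Nat.one_pos
      simp only [List.headD_cons] at hloop
      simp only [copyDPLoop, Nat.lt_irrefl, false_and, if_false, List.headD_cons,
                 if_neg hNA, hloop]
      cases hd : t.findIdx? (· == h) with
      | none =>
        cases hn : t.findIdx? (· == "NA") with
        | none => rfl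
        | some n => simp only [Option.map_none, Option.map_some]
                    rw [Nat.add_comm 1 n]
      | some d =>
        cases hn : t.findIdx? (· == "NA") with
        | none => rfl
        | some n =>
          simp only [Option.map_some]
          by_cases hlt : n < d
          · rw [if_pos (Nat.succ_lt_succ hlt), if_pos hlt, Nat.add_comm 1 n]
          · rw [if_neg (fun hc => hlt (Nat.lt_of_succ_lt_succ hc)), if_neg hlt]
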